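-- pv_equiv track=rewrite | github.com/Cocomong98/ESCLUB_MININGLEAGUE | fconline_openapi/analytics.py | _lead_and_concede_flags
-- ===== SOURCE A (Python) =====
-- def _lead_and_concede_flags(my_goal_times: list[int], opp_goal_times: list[int]) -> tuple[bool, bool]:
--     per_second: dict[int, dict[str, int]] = {}
--     for sec in my_goal_times:
--         key = int(sec)
--         bucket = per_second.setdefault(key, {"my": 0, "opp": 0})
--         bucket["my"] += 1
--     for sec in opp_goal_times:
--         key = int(sec)
--         bucket = per_second.setdefault(key, {"my": 0, "opp": 0})
--         bucket["opp"] += 1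
--
--     my_score = 0
--     opp_score = 0
--     led_during_match = False
--     conceded_while_ahead = False
--
--     seconds = sorted(per_second.keys())
--     for sec in seconds:
--         bucket = per_second.get(sec) or {"my": 0, "opp": 0}
--         my_inc = int(bucket.get("my", 0))
--         opp_inc = int(bucket.get("opp", 0))
--
--         if my_score > opp_score and opp_inc > 0:
--             conceded_while_ahead = True
--
--         my_score += my_inc
--         opp_score += opp_inc
--
--         if my_score > opp_score:
--             led_during_match = True
--
--     return led_during_match, conceded_while_ahead
-- ===== SOURCE B (Python) =====
-- def _lead_and_concede_flags(my_goal_times: list[int], opp_goal_times: list[int]) -> tuple[bool, bool]: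
--     led_during_match = any(
--         sum(1 for x in my_goal_times if x <= s) > sum(1 for x in opp_goal_times if x <= s)
--         for s in my_goal_times + opp_goal_times
--     )
--     conceded_while_ahead = any(
--         sum(1 for x in my_goal_times if x < s) > sum(1 for x in opp_goal_times if x < s)
--         for s in opp_goal_times
--     )
--     return led_during_match, conceded_while_ahead
-- ===== Notes on version B (the rewrite author's own statement) =====
-- stated objective: alternative
-- what changed: Replaced the dict-of-dicts bucketing plus sorted chronological score sweep by a score-free characterisation: each flag is an existential counting predicate over goal seconds (led iff some goal second s has strictly more my goals <= s than opponent goals <= s; conceded-while-ahead iff some opponent goal second s has more my goals < s than opponent goals < s).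
import Mathlib
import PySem

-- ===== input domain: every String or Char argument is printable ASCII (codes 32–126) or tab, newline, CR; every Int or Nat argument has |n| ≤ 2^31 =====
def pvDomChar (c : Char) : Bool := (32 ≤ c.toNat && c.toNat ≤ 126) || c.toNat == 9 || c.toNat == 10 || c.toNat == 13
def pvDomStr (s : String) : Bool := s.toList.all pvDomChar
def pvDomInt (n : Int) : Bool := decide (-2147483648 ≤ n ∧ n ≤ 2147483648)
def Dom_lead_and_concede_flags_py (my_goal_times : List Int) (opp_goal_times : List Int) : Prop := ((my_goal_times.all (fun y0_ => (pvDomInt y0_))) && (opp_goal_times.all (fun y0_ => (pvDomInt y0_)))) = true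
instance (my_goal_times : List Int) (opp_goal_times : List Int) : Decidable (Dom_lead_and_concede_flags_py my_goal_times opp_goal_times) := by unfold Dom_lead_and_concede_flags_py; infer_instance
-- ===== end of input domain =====

-- B replaces A's dict-of-dicts per-second bucketing and sorted running-score sweep by a score-free
-- existential counting characterisation of the two flags (alternative decomposition, similar cost).

-- ===== PORT A =====
-- the literal {"my": 0, "opp": 0}
def pvBucket0 : PySem.Dict String Int := PySem.Dict.ofList [("my", 0), ("opp", 0)]

-- body of the first loop: bucket = per_second.setdefault(key, {...}); bucket["my"] += 1
def pvStepMy (d : PySem.Dict Int (PySem.Dict String Int)) (sec : Int) : PySem.Dict Int (PySem.Dict String Int) :=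
  (d.setdefault sec pvBucket0).modify sec pvBucket0 (fun b => b.modify "my" 0 (· + 1))

-- body of the second loop: bucket["opp"] += 1
def pvStepOpp (d : PySem.Dict Int (PySem.Dict String Int)) (sec : Int) : PySem.Dict Int (PySem.Dict String Int) :=
  (d.setdefault sec pvBucket0).modify sec pvBucket0 (fun b => b.modify "opp" 0 (· + 1))

-- body of the sweep loop; state = (my_score, opp_score, led_during_match, conceded_while_ahead)
def pvSweepStep (per : PySem.Dict Int (PySem.Dict String Int))
    (st : Int × Int × Bool × Bool) (sec : Int) : Int × Int × Bool × Bool :=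
  -- bucket = per_second.get(sec) or {"my": 0, "opp": 0}   (falsy = absent or empty dict)
  let bucket := match per.get? sec with
    | some b => if b.size = 0 then pvBucket0 else b
    | none => pvBucket0
  let my_inc := bucket.getD "my" 0
  let opp_inc := bucket.getD "opp" 0
  let conc := if st.1 > st.2.1 ∧ opp_inc > 0 then true else st.2.2.2
  let my_score := st.1 + my_inc
  let opp_score := st.2.1 + opp_inc
  let led := if my_score > opp_score then true else st.2.2.1
  (my_score, opp_score, led, conc)

def lead_and_concede_flags_py (my_goal_times : List Int) (opp_goal_times : List Int) : Bool × Bool :=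
  let per1 := my_goal_times.foldl pvStepMy PySem.Dict.empty
  let per2 := opp_goal_times.foldl pvStepOpp per1
  let seconds := PySem.List.sorted per2.keys (fun x => x) false
  let st := seconds.foldl (pvSweepStep per2) (0, 0, false, false)
  (st.2.2.1, st.2.2.2)

-- ===== PORT B =====
def lead_and_concede_flags_py_alt (my_goal_times : List Int) (opp_goal_times : List Int) : Bool × Bool :=
  let led_during_match := (my_goal_times ++ opp_goal_times).any (fun s =>
    decide (my_goal_times.countP (fun x => decide (x ≤ s)) > opp_goal_times.countP (fun x => decide (x ≤ s))))
  let conceded_while_ahead := opp_goal_times.any (fun s =>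
    decide (my_goal_times.countP (fun x => decide (x < s)) > opp_goal_times.countP (fun x => decide (x < s))))
  (led_during_match, conceded_while_ahead)

-- ===== PRECONDITION & SPEC =====
def Spec_lead_and_concede_flags_py (my_goal_times : List Int) (opp_goal_times : List Int) (out : Bool × Bool) : Prop := out = lead_and_concede_flags_py_alt my_goal_times opp_goal_times
instance (my_goal_times : List Int) (opp_goal_times : List Int) (out : Bool × Bool) : Decidable (Spec_lead_and_concede_flags_py my_goal_times opp_goal_times out) := by unfold Spec_lead_and_concede_flags_py; infer_instance

-- ===== CLAIM (what is proved, stated in full; the proofs are below) =====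
def Claim_equal_lead_and_concede_flags_py : Prop := ∀ (my_goal_times : List Int) (opp_goal_times : List Int), Dom_lead_and_concede_flags_py my_goal_times opp_goal_times → Spec_lead_and_concede_flags_py my_goal_times opp_goal_times (lead_and_concede_flags_py my_goal_times opp_goal_times)

-- ===== LEMMAS AND PROOFS =====

-- the bucket {"my": a, "opp": c}
def pvBkt (a c : Int) : PySem.Dict String Int := PySem.Dict.ofList [("my", a), ("opp", c)]

-- invariant of the two building loops: d holds exactly the seconds of m / o with their counts
def pvRepr (d : PySem.Dict Int (PySem.Dict String Int)) (m o : List Int) : Prop :=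
  (∀ s : Int, d.getD s pvBucket0 = pvBkt (m.count s) (o.count s)) ∧
  d.keys.Nodup ∧
  (∀ s : Int, s ∈ d.keys ↔ s ∈ m ++ o)

lemma pvBkt_modify_my (a c : Int) : (pvBkt a c).modify "my" 0 (· + 1) = pvBkt (a + 1) c := rfl

lemma pvBkt_modify_opp (a c : Int) : (pvBkt a c).modify "opp" 0 (· + 1) = pvBkt a (c + 1) := rfl

lemma pvBkt_getD_my (a c : Int) : (pvBkt a c).getD "my" 0 = a := rfl
lemma pvBkt_getD_opp (a c : Int) : (pvBkt a c).getD "opp" 0 = c := rfl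
lemma pvBkt_size (a c : Int) : (pvBkt a c).size = 2 := rfl
lemma pvBucket0_eq : pvBucket0 = pvBkt 0 0 := rfl


lemma pvRepr_empty : pvRepr PySem.Dict.empty [] [] := by
  refine ⟨fun s => ?_, PySem.Dict.nodup_keys_empty, fun s => by simp [PySem.Dict.keys_empty]⟩
  rw [PySem.Dict.getD_empty]
  simp [List.count_nil]
  exact pvBucket0_eq

lemma pv_keys_stepMy (d : PySem.Dict Int (PySem.Dict String Int)) (sec : Int) :
    (pvStepMy d sec).keys = (d.setdefault sec pvBucket0).keys := by
  rw [pvStepMy, PySem.Dict.keys_modify, PySem.Dict.keys_insert_of_contains]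
  simp [PySem.Dict.contains_setdefault]

lemma pvRepr_stepMy (d : PySem.Dict Int (PySem.Dict String Int)) (m o : List Int) (sec : Int)
    (h : pvRepr d m o) : pvRepr (pvStepMy d sec) (m ++ [sec]) o := by
  obtain ⟨hg, hnd, hk⟩ := h
  have hg' : ∀ s : Int, (d.setdefault sec pvBucket0).getD s pvBucket0 = d.getD s pvBucket0 := by
    intro s
    by_cases hs : s = sec
    · subst hs; exact PySem.Dict.getD_setdefault_self d s pvBucket0 pvBucket0
    · rw [PySem.Dict.getD_eq_get?_getD, PySem.Dict.get?_setdefault_of_ne d pvBucket0 hs,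
        ← PySem.Dict.getD_eq_get?_getD]
  refine ⟨?_, ?_, ?_⟩
  · intro s
    rw [pvStepMy, PySem.Dict.getD_modify]
    by_cases hs : s = sec
    · subst hs
      rw [if_pos rfl, hg', hg s, pvBkt_modify_my]
      simp [List.count_append, Nat.cast_add]
    · rw [if_neg hs, hg', hg s]
      have h0 : List.count s [sec] = 0 := by rw [List.count_eq_zero]; simp [hs]
      simp [List.count_append, h0]
  · rw [pv_keys_stepMy, PySem.Dict.keys_setdefault]
    split_ifs with hc
    · exact hnd
    · rw [List.nodup_append]
      refine ⟨hnd, List.nodup_singleton _, ?_⟩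
      intro x hx y hy
      rintro rfl
      have hxe : x = sec := by simpa using hy
      subst hxe
      exact absurd ((PySem.Dict.contains_iff_mem_keys d x).mpr hx) (by simp [hc])
  · intro s
    rw [pv_keys_stepMy, PySem.Dict.keys_setdefault]
    split_ifs with hc
    · have hsecm : sec ∈ m ∨ sec ∈ o := by
        simpa using (hk sec).mp ((PySem.Dict.contains_iff_mem_keys d sec).mp hc)
      rw [hk s]
      simp only [List.mem_append, List.mem_singleton]
      constructor
      · tauto
      · rintro ((h1 | rfl) | h3) <;> tauto
    · simp only [List.mem_append, List.mem_singleton, hk s, List.mem_append]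
      tauto

lemma pv_keys_stepOpp (d : PySem.Dict Int (PySem.Dict String Int)) (sec : Int) :
    (pvStepOpp d sec).keys = (d.setdefault sec pvBucket0).keys := by
  rw [pvStepOpp, PySem.Dict.keys_modify, PySem.Dict.keys_insert_of_contains]
  simp [PySem.Dict.contains_setdefault]

lemma pvRepr_stepOpp (d : PySem.Dict Int (PySem.Dict String Int)) (m o : List Int) (sec : Int)
    (h : pvRepr d m o) : pvRepr (pvStepOpp d sec) m (o ++ [sec]) := by
  obtain ⟨hg, hnd, hk⟩ := h
  have hg' : ∀ s : Int, (d.setdefault sec pvBucket0).getD s pvBucket0 = d.getD s pvBucket0 := by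
    intro s
    by_cases hs : s = sec
    · subst hs; exact PySem.Dict.getD_setdefault_self d s pvBucket0 pvBucket0
    · rw [PySem.Dict.getD_eq_get?_getD, PySem.Dict.get?_setdefault_of_ne d pvBucket0 hs,
        ← PySem.Dict.getD_eq_get?_getD]
  refine ⟨?_, ?_, ?_⟩
  · intro s
    rw [pvStepOpp, PySem.Dict.getD_modify]
    by_cases hs : s = sec
    · subst hs
      rw [if_pos rfl, hg', hg s, pvBkt_modify_opp]
      simp [List.count_append, Nat.cast_add]
    · rw [if_neg hs, hg', hg s]
      have h0 : List.count s [sec] = 0 := by rw [List.count_eq_zero]; simp [hs]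
      simp [List.count_append, h0]
  · rw [pv_keys_stepOpp, PySem.Dict.keys_setdefault]
    split_ifs with hc
    · exact hnd
    · rw [List.nodup_append]
      refine ⟨hnd, List.nodup_singleton _, ?_⟩
      intro x hx y hy
      rintro rfl
      have hxe : x = sec := by simpa using hy
      subst hxe
      exact absurd ((PySem.Dict.contains_iff_mem_keys d x).mpr hx) (by simp [hc])
  · intro s
    rw [pv_keys_stepOpp, PySem.Dict.keys_setdefault]
    split_ifs with hc
    · have hsecm : sec ∈ m ∨ sec ∈ o := by
        simpa using (hk sec).mp ((PySem.Dict.contains_iff_mem_keys d sec).mp hc)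
      rw [hk s]
      simp only [List.mem_append, List.mem_singleton]
      constructor
      · tauto
      · rintro (h1 | (h2 | rfl)) <;> tauto
    · simp only [List.mem_append, List.mem_singleton, hk s, List.mem_append]
      tauto


lemma pvRepr_foldMy (l : List Int) : ∀ (d : PySem.Dict Int (PySem.Dict String Int)) (m o : List Int),
    pvRepr d m o → pvRepr (l.foldl pvStepMy d) (m ++ l) o := by
  induction l with
  | nil => intro d m o h; simpa using h
  | cons x t ih =>
      intro d m o h
      have := ih (pvStepMy d x) (m ++ [x]) o (pvRepr_stepMy d m o x h)
      simpa [List.append_assoc] using this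

lemma pvRepr_foldOpp (l : List Int) : ∀ (d : PySem.Dict Int (PySem.Dict String Int)) (m o : List Int),
    pvRepr d m o → pvRepr (l.foldl pvStepOpp d) m (o ++ l) := by
  induction l with
  | nil => intro d m o h; simpa using h
  | cons x t ih =>
      intro d m o h
      have := ih (pvStepOpp d x) m (o ++ [x]) (pvRepr_stepOpp d m o x h)
      simpa [List.append_assoc] using this

-- counting helper: splitting off one non-member head
lemma pv_countP_notmem_cons (l : List Int) (h : Int) (t : List Int) (hht : h ∉ t) :
    l.countP (fun x => decide (x ∉ t)) = l.countP (fun x => decide (x ∉ h :: t)) + l.count h := by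
  induction l with
  | nil => simp
  | cons y l ih =>
      simp only [List.countP_cons, List.count_cons]
      rw [ih]
      by_cases hy : y = h
      · subst hy; simp [hht]; omega
      · by_cases hyt : y ∈ t <;> simp [hy, hyt] <;> omega

-- the sweep loop computes the two existential flags
lemma pv_sweep_spec (my opp : List Int) (per : PySem.Dict Int (PySem.Dict String Int))
    (hR : pvRepr per my opp) :
    ∀ (L : List Int) (a b : Int) (led conc : Bool),
      (∀ s ∈ L, s ∈ my ++ opp) →
      (∀ x ∈ my ++ opp, x ∈ L ∨ ∀ y ∈ L, x < y) →
      L.Pairwise (· < ·) →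
      a = (my.countP (fun x => decide (x ∉ L)) : Int) →
      b = (opp.countP (fun x => decide (x ∉ L)) : Int) →
      (L.foldl (pvSweepStep per) (a, b, led, conc)).2.2 =
        (led || L.any (fun s => decide (my.countP (fun x => decide (x ≤ s)) > opp.countP (fun x => decide (x ≤ s)))),
         conc || L.any (fun s => decide (s ∈ opp) && decide (my.countP (fun x => decide (x < s)) > opp.countP (fun x => decide (x < s))))) := by
  obtain ⟨hg, hnd, hk⟩ := hR
  intro L
  induction L with
  | nil => intro a b led conc _ _ _ _ _; simp
  | cons hd t ih =>
      intro a b led conc hsub hcomp hsort ha hb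
      have hhd : hd ∈ my ++ opp := hsub hd (by simp)
      have hkey : hd ∈ (PySem.Dict.keys per) := (hk hd).mpr hhd
      have hget : per.get? hd = some (pvBkt (my.count hd) (opp.count hd)) := by
        cases hq : per.get? hd with
        | none => exact absurd ((PySem.Dict.get?_eq_none_iff_not_mem_keys per hd).mp hq) (by simp [hkey])
        | some v =>
            have hv := hg hd
            rw [PySem.Dict.getD_eq_get?_getD, hq] at hv
            simp only [Option.getD_some] at hv
            rw [hv]
      rw [List.pairwise_cons] at hsort
      obtain ⟨hhdlt, hsort'⟩ := hsort
      have hhdnot : hd ∉ t := fun hmem => absurd (hhdlt hd hmem) (lt_irrefl hd)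
      -- membership characterisations on already-processed elements
      have hnotL : ∀ x ∈ my ++ opp, (x ∉ hd :: t) ↔ x < hd := by
        intro x hx
        constructor
        · intro hxn
          rcases hcomp x hx with hxe | hlt
          · exact absurd hxe hxn
          · exact hlt hd (by simp)
        · intro hxlt
          simp only [List.mem_cons, not_or]
          exact ⟨fun he => absurd he (by omega), fun ht => absurd (hhdlt x ht) (by omega)⟩
      have hnotT : ∀ x ∈ my ++ opp, (x ∉ t) ↔ x ≤ hd := by
        intro x hx
        constructor
        · intro hxn
          rcases hcomp x hx with hxe | hlt
          · rcases List.mem_cons.mp hxe with rfl | ht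
            · exact le_refl x
            · exact absurd ht hxn
          · exact le_of_lt (hlt hd (by simp))
        · intro hxle ht
          exact absurd (hhdlt x ht) (by omega)
      -- countP rewrites
      have hmyL : my.countP (fun x => decide (x ∉ hd :: t)) = my.countP (fun x => decide (x < hd)) :=
        List.countP_congr (fun x hx => by simpa using hnotL x (List.mem_append_left _ hx))
      have hoppL : opp.countP (fun x => decide (x ∉ hd :: t)) = opp.countP (fun x => decide (x < hd)) :=
        List.countP_congr (fun x hx => by simpa using hnotL x (List.mem_append_right _ hx))
      have hmyT : my.countP (fun x => decide (x ∉ t)) = my.countP (fun x => decide (x ≤ hd)) :=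
        List.countP_congr (fun x hx => by simpa using hnotT x (List.mem_append_left _ hx))
      have hoppT : opp.countP (fun x => decide (x ∉ t)) = opp.countP (fun x => decide (x ≤ hd)) :=
        List.countP_congr (fun x hx => by simpa using hnotT x (List.mem_append_right _ hx))
      have ha' : a + (my.count hd : Int) = (my.countP (fun x => decide (x ∉ t)) : Int) := by
        rw [ha, pv_countP_notmem_cons my hd t hhdnot]; push_cast; ring
      have hb' : b + (opp.count hd : Int) = (opp.countP (fun x => decide (x ∉ t)) : Int) := by
        rw [hb, pv_countP_notmem_cons opp hd t hhdnot]; push_cast; ring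
      -- one step of the fold
      have hstep : pvSweepStep per (a, b, led, conc) hd =
          (a + (my.count hd : Int), b + (opp.count hd : Int),
           (if a + (my.count hd : Int) > b + (opp.count hd : Int) then true else led),
           (if a > b ∧ ((opp.count hd : Int) > 0) then true else conc)) := by
        rw [pvSweepStep, hget]
        simp [pvBkt_size, pvBkt_getD_my, pvBkt_getD_opp]
      rw [List.foldl_cons, hstep,
        ih _ _ _ _ (fun s hs => hsub s (List.mem_cons_of_mem _ hs))
          (fun x hx => by
            rcases hcomp x hx with hxe | hlt
            · rcases List.mem_cons.mp hxe with rfl | ht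
              · exact Or.inr (fun y hy => hhdlt y hy)
              · exact Or.inl ht
            · exact Or.inr (fun y hy => hlt y (List.mem_cons_of_mem _ hy)))
          hsort' ha' hb']
      -- compare the two flag expressions
      have hcondL : (a + (my.count hd : Int) > b + (opp.count hd : Int)) ↔
          (my.countP (fun x => decide (x ≤ hd)) > opp.countP (fun x => decide (x ≤ hd))) := by
        rw [ha', hb', hmyT, hoppT]
        exact_mod_cast Iff.rfl
      have hcondC : (a > b ∧ ((opp.count hd : Int) > 0)) ↔
          (hd ∈ opp ∧ (my.countP (fun x => decide (x < hd)) > opp.countP (fun x => decide (x < hd)))) := by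
        rw [ha, hb, hmyL, hoppL]
        constructor
        · rintro ⟨h1, h2⟩
          exact ⟨List.count_pos_iff.mp (by exact_mod_cast h2), by exact_mod_cast h1⟩
        · rintro ⟨h1, h2⟩
          exact ⟨by exact_mod_cast h2, by exact_mod_cast List.count_pos_iff.mpr h1⟩
      rw [List.any_cons, List.any_cons]
      simp only [Prod.mk.injEq]
      constructor
      · by_cases hc : (a + (my.count hd : Int) > b + (opp.count hd : Int))
        · simp [hc, hcondL.mp hc]
        · have hcf : ¬ (my.countP (fun x => decide (x ≤ hd)) > opp.countP (fun x => decide (x ≤ hd))) :=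
            fun h => hc (hcondL.mpr h)
          simp [hc, hcf]
      · by_cases hc : (a > b ∧ ((opp.count hd : Int) > 0))
        · obtain ⟨h1, h2⟩ := hcondC.mp hc
          simp [hc, h1, h2]
        · have hcf : ¬ (hd ∈ opp ∧ (my.countP (fun x => decide (x < hd)) > opp.countP (fun x => decide (x < hd)))) :=
            fun h => hc (hcondC.mpr h)
          have hfalse : (decide (hd ∈ opp) && decide (my.countP (fun x => decide (x < hd)) > opp.countP (fun x => decide (x < hd)))) = false := by
            rw [← Bool.decide_and]; exact decide_eq_false hcf
          rw [if_neg hc, hfalse]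
          simp

-- ===== VERDICT (by name: the statement is the Claim_ definition above) =====
theorem lead_and_concede_flags_py_spec : Claim_equal_lead_and_concede_flags_py := by
  intro my opp _
  unfold Spec_lead_and_concede_flags_py
  have hR : pvRepr (opp.foldl pvStepOpp (my.foldl pvStepMy PySem.Dict.empty)) my opp := by
    have h1 := pvRepr_foldMy my PySem.Dict.empty [] [] pvRepr_empty
    have h2 := pvRepr_foldOpp opp (my.foldl pvStepMy PySem.Dict.empty) my [] (by simpa using h1)
    simpa using h2
  set per := opp.foldl pvStepOpp (my.foldl pvStepMy PySem.Dict.empty) with hper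
  set L := PySem.List.sorted per.keys (fun x => x) false with hLdef
  obtain ⟨hg, hnd, hk⟩ := hR
  have hperm : L.Perm per.keys := PySem.List.sorted_perm _ _ _
  have hmemL : ∀ s : Int, s ∈ L ↔ s ∈ my ++ opp := fun s => by rw [hperm.mem_iff]; exact hk s
  have hndL : L.Nodup := hperm.nodup_iff.mpr hnd
  have hle : L.Pairwise (fun a b => a ≤ b) := PySem.List.sorted_pairwise per.keys (fun x => x)
  have hlt : L.Pairwise (· < ·) := (hle.and hndL).imp (fun h => lt_of_le_of_ne h.1 h.2)
  have h0my : my.countP (fun x => decide (x ∉ L)) = 0 := by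
    rw [List.countP_eq_zero]
    intro x hx
    simpa using (hmemL x).mpr (by simp [hx])
  have h0opp : opp.countP (fun x => decide (x ∉ L)) = 0 := by
    rw [List.countP_eq_zero]
    intro x hx
    simpa using (hmemL x).mpr (by simp [hx])
  have hsweep := pv_sweep_spec my opp per ⟨hg, hnd, hk⟩ L 0 0 false false
    (fun s hs => (hmemL s).mp hs)
    (fun x hx => Or.inl ((hmemL x).mpr hx))
    hlt (by rw [h0my]; simp) (by rw [h0opp]; simp)
  have hA : lead_and_concede_flags_py my opp =
      (L.any (fun s => decide (my.countP (fun x => decide (x ≤ s)) > opp.countP (fun x => decide (x ≤ s)))),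
       L.any (fun s => decide (s ∈ opp) && decide (my.countP (fun x => decide (x < s)) > opp.countP (fun x => decide (x < s))))) := by
    rw [lead_and_concede_flags_py]
    rw [← hper, ← hLdef]
    simp only [Bool.false_or] at hsweep
    rw [hsweep]
  rw [hA, lead_and_concede_flags_py_alt]
  have hled : L.any (fun s => decide (my.countP (fun x => decide (x ≤ s)) > opp.countP (fun x => decide (x ≤ s)))) =
      (my ++ opp).any (fun s => decide (my.countP (fun x => decide (x ≤ s)) > opp.countP (fun x => decide (x ≤ s)))) := by
    rw [Bool.eq_iff_iff, List.any_eq_true, List.any_eq_true]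
    constructor
    · rintro ⟨s, hs, hps⟩; exact ⟨s, (hmemL s).mp hs, hps⟩
    · rintro ⟨s, hs, hps⟩; exact ⟨s, (hmemL s).mpr hs, hps⟩
  have hconc : L.any (fun s => decide (s ∈ opp) && decide (my.countP (fun x => decide (x < s)) > opp.countP (fun x => decide (x < s)))) =
      opp.any (fun s => decide (my.countP (fun x => decide (x < s)) > opp.countP (fun x => decide (x < s)))) := by
    rw [Bool.eq_iff_iff, List.any_eq_true, List.any_eq_true]
    constructor
    · rintro ⟨s, hs, hps⟩
      rw [Bool.and_eq_true, decide_eq_true_eq] at hps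
      exact ⟨s, hps.1, hps.2⟩
    · rintro ⟨s, hs, hps⟩
      refine ⟨s, (hmemL s).mpr (List.mem_append_right _ hs), ?_⟩
      rw [Bool.and_eq_true, decide_eq_true_eq]
      exact ⟨hs, hps⟩
  rw [hled, hconc]
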